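-- pv_equiv track=rewrite | github.com/StrongerProgrammer7/cryptographicalProtocol | helper.py | gcdEuclidean
-- ===== SOURCE A (Python) =====
-- def swap(a, b):
--     t = a
--     a = b
--     b = t
--     return a, b
--
-- def gcdEuclidean(a, b):
--     if b > a:
--         a, b = swap(a, b)
--     qs = []
--     while b > 0:
--         q = a // b
--         r = a % b
--         a = b
--         b = r
--         qs.append(q)
--
--     return a, qs
-- ===== SOURCE B (Python) =====
-- def _rec(a, b):
--     if b <= 0:
--         return a, []
--     g, rest = _rec(b, a % b)
--     return g, [a // b] + rest
--
-- def gcdEuclidean(a, b):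
--     if b > a:
--         a, b = b, a
--     return _rec(a, b)
-- ===== Notes on version B (the rewrite author's own statement) =====
-- stated objective: alternative
-- what changed: Replaces the imperative while-loop that appends quotients to a mutable list with a recursive helper that prepends each quotient while unwinding the recursion.
import Mathlib
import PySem

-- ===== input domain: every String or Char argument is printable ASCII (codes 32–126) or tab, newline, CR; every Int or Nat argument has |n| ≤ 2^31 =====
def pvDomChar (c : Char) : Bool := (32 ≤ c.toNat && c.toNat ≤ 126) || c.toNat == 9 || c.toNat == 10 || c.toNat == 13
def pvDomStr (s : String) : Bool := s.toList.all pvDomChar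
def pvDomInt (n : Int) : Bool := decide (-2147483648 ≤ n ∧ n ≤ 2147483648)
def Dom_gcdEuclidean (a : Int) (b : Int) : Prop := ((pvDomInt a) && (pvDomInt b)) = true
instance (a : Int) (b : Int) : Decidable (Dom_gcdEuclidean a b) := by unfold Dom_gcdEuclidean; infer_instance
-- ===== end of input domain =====

-- B replaces A's imperative append-loop with a recursive helper that prepends each
-- quotient while unwinding (alternative decomposition, same asymptotic cost).

-- ===== PORT A =====
-- helper 'swap' of A: t = a; a = b; b = t; return a, b
def pySwap (a b : Int) : Int × Int := (b, a)

-- the while-loop of A, state (a, b, qs)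
def gcdEuclideanLoop (a b : Int) (qs : List Int) : Int × List Int :=
  if h : b > 0 then
    gcdEuclideanLoop b (PySem.Int.mod a b) (qs ++ [PySem.Int.floordiv a b])
  else (a, qs)
termination_by b.toNat
decreasing_by
  have h1 := PySem.Int.mod_lt a h
  have h2 := PySem.Int.mod_nonneg a h
  omega

def gcdEuclidean (a : Int) (b : Int) : Int × List Int :=
  let p := if b > a then pySwap a b else (a, b)
  gcdEuclideanLoop p.1 p.2 []

-- ===== PORT B =====
-- _rec of Source B: returns (a, []) when b <= 0, else prepends a // b while unwinding
def gcdRec (a b : Int) : Int × List Int :=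
  if h : b ≤ 0 then (a, [])
  else
    let p := gcdRec b (PySem.Int.mod a b)
    (p.1, PySem.Int.floordiv a b :: p.2)
termination_by b.toNat
decreasing_by
  have hb : (0:Int) < b := by omega
  have h1 := PySem.Int.mod_lt a hb
  have h2 := PySem.Int.mod_nonneg a hb
  omega

def gcdEuclidean_alt (a : Int) (b : Int) : Int × List Int :=
  if b > a then gcdRec b a else gcdRec a b

-- ===== PRECONDITION & SPEC =====
def Spec_gcdEuclidean (a : Int) (b : Int) (out : Int × List Int) : Prop := out = gcdEuclidean_alt a b
instance (a : Int) (b : Int) (out : Int × List Int) : Decidable (Spec_gcdEuclidean a b out) := by unfold Spec_gcdEuclidean; infer_instance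

-- ===== CLAIM (what is proved, stated in full; the proofs are below) =====
def Claim_equal_gcdEuclidean : Prop := ∀ (a : Int) (b : Int), Dom_gcdEuclidean a b → Spec_gcdEuclidean a b (gcdEuclidean a b)

-- ===== LEMMAS AND PROOFS =====

-- the append-loop equals the prepend-recursion with qs as accumulated prefix
theorem gcdLoop_eq_rec (a b : Int) (qs : List Int) :
    gcdEuclideanLoop a b qs = ((gcdRec a b).1, qs ++ (gcdRec a b).2) := by
  induction a, b, qs using gcdEuclideanLoop.induct with
  | case1 a b qs h ih =>
    rw [gcdEuclideanLoop, dif_pos h, ih]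
    conv_rhs => rw [gcdRec.eq_def]
    rw [dif_neg (by omega)]
    simp
  | case2 a b qs h =>
    rw [gcdEuclideanLoop, dif_neg h]
    conv_rhs => rw [gcdRec.eq_def]
    rw [dif_pos (by omega)]
    simp

-- ===== VERDICT (by name: the statement is the Claim_ definition above) =====
theorem gcdEuclidean_spec : Claim_equal_gcdEuclidean := by
  intro a b _
  unfold Spec_gcdEuclidean gcdEuclidean gcdEuclidean_alt pySwap
  by_cases h : b > a <;> simp [h, gcdLoop_eq_rec]
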